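-- pv_equiv track=rewrite | github.com/saqibsiddiq/autism_detection | models/behavioral_model.py | _calculate_behavioral_scores
-- ===== SOURCE A (Python) =====
-- def _calculate_behavioral_scores(questionnaire_data):
--     """Calculate behavioral domain scores"""
--     scores = {}
--
--     # M-CHAT-R style questions (social communication)
--     social_questions = [
--         'enjoys_being_swung', 'interest_in_other_children', 'enjoys_climbing',
--         'enjoys_peek_a_boo', 'pretend_play', 'uses_index_finger',
--         'brings_objects_to_show', 'eye_contact', 'unusual_finger_movements',
--         'tries_to_attract_attention'
--     ]
--
--     # AQ-10 style questions (autism traits)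
--     autism_trait_questions = [
--         'notices_small_sounds', 'concentrates_on_whole_picture', 'easy_to_do_several_things',
--         'enjoys_social_chit_chat', 'finds_easy_to_read_between_lines', 'knows_how_to_tell_stories',
--         'drawn_to_people', 'enjoys_social_activities', 'finds_easy_to_work_out_intentions',
--         'good_at_social_chit_chat'
--     ]
--
--     # Calculate domain scores
--     social_score = sum([questionnaire_data.get(q, 0) for q in social_questions if q in questionnaire_data])
--     autism_traits_score = sum([questionnaire_data.get(q, 0) for q in autism_trait_questions if q in questionnaire_data])
--
--     scores['social_communication_score'] = social_score
--     scores['autism_traits_score'] = autism_traits_score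
--     scores['total_behavioral_score'] = social_score + autism_traits_score
--
--     # Individual question scores
--     for question, answer in questionnaire_data.items():
--         scores[f'q_{question}'] = answer
--
--     return scores
-- ===== SOURCE B (Python) =====
-- def _calculate_behavioral_scores(questionnaire_data):
--     """Calculate behavioral domain scores (single pass over the data)."""
--     social_set = {
--         'enjoys_being_swung', 'interest_in_other_children', 'enjoys_climbing',
--         'enjoys_peek_a_boo', 'pretend_play', 'uses_index_finger',
--         'brings_objects_to_show', 'eye_contact', 'unusual_finger_movements',
--         'tries_to_attract_attention'
--     }
--     autism_set = {
--         'notices_small_sounds', 'concentrates_on_whole_picture', 'easy_to_do_several_things',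
--         'enjoys_social_chit_chat', 'finds_easy_to_read_between_lines', 'knows_how_to_tell_stories',
--         'drawn_to_people', 'enjoys_social_activities', 'finds_easy_to_work_out_intentions',
--         'good_at_social_chit_chat'
--     }
--     # seed the summary keys so they come first in the result dict
--     scores = {'social_communication_score': 0, 'autism_traits_score': 0,
--               'total_behavioral_score': 0}
--     social_score = 0
--     autism_traits_score = 0
--     for question, answer in questionnaire_data.items():
--         if question in social_set:
--             social_score += answer
--         if question in autism_set:
--             autism_traits_score += answer
--         scores[f'q_{question}'] = answer
--     scores['social_communication_score'] = social_score
--     scores['autism_traits_score'] = autism_traits_score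
--     scores['total_behavioral_score'] = social_score + autism_traits_score
--     return scores
-- ===== Notes on version B (the rewrite author's own statement) =====
-- stated objective: simpler
-- what changed: A's two fixed-list sum comprehensions (each doing a dict lookup per question) plus a separate copy loop are fused into a single pass over questionnaire_data.items() that accumulates both domain scores via set membership and copies the q_ entries, with the three summary keys seeded first so the result dict has identical order.
import Mathlib
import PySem

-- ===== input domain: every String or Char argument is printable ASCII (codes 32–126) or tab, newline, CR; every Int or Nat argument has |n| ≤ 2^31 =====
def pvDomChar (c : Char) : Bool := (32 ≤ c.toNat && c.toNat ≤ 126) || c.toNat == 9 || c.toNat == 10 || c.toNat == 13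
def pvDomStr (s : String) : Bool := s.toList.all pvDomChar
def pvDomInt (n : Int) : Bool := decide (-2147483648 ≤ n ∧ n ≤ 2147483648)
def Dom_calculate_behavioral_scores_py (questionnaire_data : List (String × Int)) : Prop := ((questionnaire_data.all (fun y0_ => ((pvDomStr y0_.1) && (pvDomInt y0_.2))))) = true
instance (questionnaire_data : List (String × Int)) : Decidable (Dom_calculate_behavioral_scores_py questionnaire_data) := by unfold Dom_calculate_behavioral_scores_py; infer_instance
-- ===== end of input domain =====

-- B fuses A's two fixed-list sum comprehensions and the copy loop into one pass over the data
-- using two membership sets (objective: simpler / one traversal; same asymptotic cost).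

-- ===== PORT A =====
def pvSocialQs : List String :=
  ["enjoys_being_swung", "interest_in_other_children", "enjoys_climbing",
   "enjoys_peek_a_boo", "pretend_play", "uses_index_finger",
   "brings_objects_to_show", "eye_contact", "unusual_finger_movements",
   "tries_to_attract_attention"]

def pvAutismQs : List String :=
  ["notices_small_sounds", "concentrates_on_whole_picture", "easy_to_do_several_things",
   "enjoys_social_chit_chat", "finds_easy_to_read_between_lines", "knows_how_to_tell_stories",
   "drawn_to_people", "enjoys_social_activities", "finds_easy_to_work_out_intentions",
   "good_at_social_chit_chat"]

def calculate_behavioral_scores_py (questionnaire_data : List (String × Int)) : List (String × Int) :=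
  let data : PySem.Dict String Int := PySem.Dict.mk questionnaire_data
  let social_score : Int :=
    ((pvSocialQs.filter (fun q => data.contains q)).map (fun q => data.getD q 0)).sum
  let autism_traits_score : Int :=
    ((pvAutismQs.filter (fun q => data.contains q)).map (fun q => data.getD q 0)).sum
  let scores : PySem.Dict String Int :=
    ((PySem.Dict.empty.insert "social_communication_score" social_score).insert
        "autism_traits_score" autism_traits_score).insert
      "total_behavioral_score" (social_score + autism_traits_score)
  let scores := questionnaire_data.foldl (fun d p => d.insert ("q_" ++ p.1) p.2) scores
  scores.items

-- ===== PORT B =====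
def calculate_behavioral_scores_py_alt (questionnaire_data : List (String × Int)) : List (String × Int) :=
  let social_set : PySem.Set String := PySem.Set.ofList pvSocialQs
  let autism_set : PySem.Set String := PySem.Set.ofList pvAutismQs
  -- seed the summary keys so they come first in the result dict
  let scores0 : PySem.Dict String Int :=
    ((PySem.Dict.empty.insert "social_communication_score" 0).insert
        "autism_traits_score" 0).insert "total_behavioral_score" 0
  let st : Int × Int × PySem.Dict String Int :=
    questionnaire_data.foldl
      (fun st p =>
        ((if social_set.contains p.1 then st.1 + p.2 else st.1),
         (if autism_set.contains p.1 then st.2.1 + p.2 else st.2.1),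
         st.2.2.insert ("q_" ++ p.1) p.2))
      (0, 0, scores0)
  let scores :=
    ((st.2.2.insert "social_communication_score" st.1).insert
        "autism_traits_score" st.2.1).insert "total_behavioral_score" (st.1 + st.2.1)
  scores.items

-- ===== PRECONDITION & SPEC =====
-- Pre_ excludes association lists with duplicate keys: they do not represent a Python dict
-- (A's argument is a dict, so duplicate keys are unreachable for the Python source).
def Pre_calculate_behavioral_scores_py (questionnaire_data : List (String × Int)) : Prop :=
  (questionnaire_data.map Prod.fst).Nodup
instance (questionnaire_data : List (String × Int)) : Decidable (Pre_calculate_behavioral_scores_py questionnaire_data) := by unfold Pre_calculate_behavioral_scores_py; infer_instance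

def pvWitness_calculate_behavioral_scores_py : (List (String × Int)) :=
  [("eye_contact", 1), ("notices_small_sounds", 2), ("age", 3)]

def Spec_calculate_behavioral_scores_py (questionnaire_data : List (String × Int)) (out : List (String × Int)) : Prop := out = calculate_behavioral_scores_py_alt questionnaire_data
instance (questionnaire_data : List (String × Int)) (out : List (String × Int)) : Decidable (Spec_calculate_behavioral_scores_py questionnaire_data out) := by unfold Spec_calculate_behavioral_scores_py; infer_instance

-- ===== CLAIM (what is proved, stated in full; the proofs are below) =====
def Claim_equal_calculate_behavioral_scores_py : Prop := ∀ (questionnaire_data : List (String × Int)), Dom_calculate_behavioral_scores_py questionnaire_data → Pre_calculate_behavioral_scores_py questionnaire_data → Spec_calculate_behavioral_scores_py questionnaire_data (calculate_behavioral_scores_py questionnaire_data)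

-- ===== LEMMAS AND PROOFS =====

-- "q_"-prefixed keys never collide with the three summary keys, and the prefixing is injective
lemma pv_q_inj : Function.Injective (fun k : String => "q_" ++ k) := by
  intro a b h
  have h' := congrArg String.toList h
  exact String.toList_injective (by simpa [String.toList_append] using h')

lemma pv_q_ne (k : String) :
    ("q_" ++ k ≠ "social_communication_score") ∧ ("q_" ++ k ≠ "autism_traits_score") ∧
    ("q_" ++ k ≠ "total_behavioral_score") := by
  refine ⟨?_, ?_, ?_⟩ <;>
    · intro h
      have h' := congrArg String.toList h
      simp [String.toList_append] at h'

-- A's items, under Nodup keys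
lemma pv_A_items (qd : List (String × Int))
    (h : (qd.map Prod.fst).Nodup) :
    calculate_behavioral_scores_py qd =
      [("social_communication_score",
          ((pvSocialQs.filter (fun q => (PySem.Dict.mk qd).contains q)).map
            (fun q => (PySem.Dict.mk qd).getD q 0)).sum),
       ("autism_traits_score",
          ((pvAutismQs.filter (fun q => (PySem.Dict.mk qd).contains q)).map
            (fun q => (PySem.Dict.mk qd).getD q 0)).sum),
       ("total_behavioral_score",
          ((pvSocialQs.filter (fun q => (PySem.Dict.mk qd).contains q)).map
            (fun q => (PySem.Dict.mk qd).getD q 0)).sum +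
          ((pvAutismQs.filter (fun q => (PySem.Dict.mk qd).contains q)).map
            (fun q => (PySem.Dict.mk qd).getD q 0)).sum)] ++
      qd.map (fun p => ("q_" ++ p.1, p.2)) := by
  have hkeys : (qd.map (fun p : String × Int => "q_" ++ p.1)).Nodup := by
    have heq : qd.map (fun p : String × Int => "q_" ++ p.1)
        = (qd.map Prod.fst).map (fun k => "q_" ++ k) := by
      simp [List.map_map, Function.comp]
    rw [heq]; exact h.map pv_q_inj
  unfold calculate_behavioral_scores_py
  rw [PySem.Dict.items_foldl_insert_fresh qd (fun p => "q_" ++ p.1) (fun p => p.2) _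
        (fun p _ => by
          simp [PySem.Dict.contains_insert, PySem.Dict.contains_empty,
                (pv_q_ne p.1).1, (pv_q_ne p.1).2.1, (pv_q_ne p.1).2.2])
        hkeys]
  simp [PySem.Dict.items_insert, PySem.Dict.contains_insert, PySem.Dict.empty]

-- the fold in B splits into the two sums and the dict loop
lemma pv_B_fold (qd : List (String × Int)) (s a : Int) (d : PySem.Dict String Int) :
    qd.foldl
      (fun (st : Int × Int × PySem.Dict String Int) p =>
        ((if (PySem.Set.ofList pvSocialQs).contains p.1 then st.1 + p.2 else st.1),
         (if (PySem.Set.ofList pvAutismQs).contains p.1 then st.2.1 + p.2 else st.2.1),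
         st.2.2.insert ("q_" ++ p.1) p.2))
      (s, a, d) =
      (s + ((qd.filter (fun p => (PySem.Set.ofList pvSocialQs).contains p.1)).map Prod.snd).sum,
       a + ((qd.filter (fun p => (PySem.Set.ofList pvAutismQs).contains p.1)).map Prod.snd).sum,
       qd.foldl (fun d p => d.insert ("q_" ++ p.1) p.2) d) := by
  induction qd generalizing s a d with
  | nil => simp
  | cons p rest ih =>
    simp only [List.foldl_cons, List.filter_cons, ih]
    split_ifs <;> simp [add_assoc]

-- the two summation orders agree when keys are unique
lemma pv_sum_eq (Qs : List String) (hQ : Qs.Nodup) (qd : List (String × Int))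
    (h : (qd.map Prod.fst).Nodup) :
    ((Qs.filter (fun q => (PySem.Dict.mk qd).contains q)).map
        (fun q => (PySem.Dict.mk qd).getD q 0)).sum =
      ((qd.filter (fun p => (PySem.Set.ofList Qs).contains p.1)).map Prod.snd).sum := by
  have hkeys : (PySem.Dict.mk qd).keys = qd.map Prod.fst := PySem.Dict.keys_mk qd
  have hla_nd : (Qs.filter (fun q => (PySem.Dict.mk qd).contains q)).Nodup := hQ.filter _
  have hlbfst : (qd.filter (fun p => (PySem.Set.ofList Qs).contains p.1)).map Prod.fst
      = (qd.map Prod.fst).filter (fun q => (PySem.Set.ofList Qs).contains q) := by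
    rw [List.filter_map]; rfl
  have hlb_nd : ((qd.filter (fun p => (PySem.Set.ofList Qs).contains p.1)).map Prod.fst).Nodup := by
    rw [hlbfst]; exact h.filter _
  have hmem : ∀ x, x ∈ Qs.filter (fun q => (PySem.Dict.mk qd).contains q) ↔
      x ∈ (qd.filter (fun p => (PySem.Set.ofList Qs).contains p.1)).map Prod.fst := by
    intro x
    rw [hlbfst]
    simp only [List.mem_filter, PySem.Dict.contains_iff_mem_keys, hkeys]
    constructor
    · rintro ⟨h1, h2⟩
      refine ⟨h2, ?_⟩
      simpa using (PySem.Set.mem_ofList Qs x).mpr h1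
    · rintro ⟨h1, h2⟩
      refine ⟨(PySem.Set.mem_ofList Qs x).mp (by simpa using h2), h1⟩
  have hperm : (Qs.filter (fun q => (PySem.Dict.mk qd).contains q)).Perm
      ((qd.filter (fun p => (PySem.Set.ofList Qs).contains p.1)).map Prod.fst) :=
    (List.perm_ext_iff_of_nodup hla_nd hlb_nd).mpr hmem
  have hmapeq : (qd.filter (fun p => (PySem.Set.ofList Qs).contains p.1)).map Prod.snd
      = ((qd.filter (fun p => (PySem.Set.ofList Qs).contains p.1)).map Prod.fst).map
          (fun q => (PySem.Dict.mk qd).getD q 0) := by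
    rw [List.map_map]
    refine (List.map_congr_left fun p hp => ?_).symm
    have hpqd : p ∈ qd := (List.mem_filter.mp hp).1
    exact PySem.Dict.getD_of_mem_items (PySem.Dict.mk qd) hpqd (by rw [hkeys]; exact h) 0
  rw [hmapeq]
  exact List.Perm.sum_eq (hperm.map _)

-- overwriting inserts on the three seeded summary keys replace them in place
lemma pv_final_items (L : List (String × Int))
    (hL : ∀ p ∈ L, p.1 ≠ "social_communication_score" ∧ p.1 ≠ "autism_traits_score" ∧
      p.1 ≠ "total_behavioral_score") (x0 y0 z0 x y z : Int) :
    ((((PySem.Dict.mk (("social_communication_score", x0) :: ("autism_traits_score", y0) ::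
          ("total_behavioral_score", z0) :: L)).insert "social_communication_score" x).insert
        "autism_traits_score" y).insert "total_behavioral_score" z).items =
      ("social_communication_score", x) :: ("autism_traits_score", y) ::
        ("total_behavioral_score", z) :: L := by
  have hc1 : (PySem.Dict.mk (("social_communication_score", x0) :: ("autism_traits_score", y0) ::
      ("total_behavioral_score", z0) :: L)).contains "social_communication_score" = true := by
    simp [PySem.Dict.contains_mk]
  have hc2 : ((PySem.Dict.mk (("social_communication_score", x0) :: ("autism_traits_score", y0) ::
      ("total_behavioral_score", z0) :: L)).insert "social_communication_score" x).contains
      "autism_traits_score" = true := by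
    simp [PySem.Dict.contains_insert, PySem.Dict.contains_mk]
  have hc3 : (((PySem.Dict.mk (("social_communication_score", x0) :: ("autism_traits_score", y0) ::
      ("total_behavioral_score", z0) :: L)).insert "social_communication_score" x).insert
      "autism_traits_score" y).contains "total_behavioral_score" = true := by
    simp [PySem.Dict.contains_insert, PySem.Dict.contains_mk]
  rw [PySem.Dict.items_insert_of_contains _ z hc3, PySem.Dict.items_insert_of_contains _ y hc2,
      PySem.Dict.items_insert_of_contains _ x hc1]
  simp only [List.map_cons, List.map_map]
  simp only [List.cons.injEq]
  refine ⟨by simp, by simp, by simp, ?_⟩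
  conv_rhs => rw [← List.map_id L]
  exact List.map_congr_left (fun p hp => by
    simp [Function.comp, (hL p hp).1, (hL p hp).2.1, (hL p hp).2.2])

lemma pv_B_items (qd : List (String × Int))
    (h : (qd.map Prod.fst).Nodup) :
    calculate_behavioral_scores_py_alt qd =
      [("social_communication_score",
          ((qd.filter (fun p => (PySem.Set.ofList pvSocialQs).contains p.1)).map Prod.snd).sum),
       ("autism_traits_score",
          ((qd.filter (fun p => (PySem.Set.ofList pvAutismQs).contains p.1)).map Prod.snd).sum),
       ("total_behavioral_score",
          ((qd.filter (fun p => (PySem.Set.ofList pvSocialQs).contains p.1)).map Prod.snd).sum +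
          ((qd.filter (fun p => (PySem.Set.ofList pvAutismQs).contains p.1)).map Prod.snd).sum)] ++
      qd.map (fun p => ("q_" ++ p.1, p.2)) := by
  have hkeys : (qd.map (fun p : String × Int => "q_" ++ p.1)).Nodup := by
    have heq : qd.map (fun p : String × Int => "q_" ++ p.1)
        = (qd.map Prod.fst).map (fun k => "q_" ++ k) := by
      simp [List.map_map, Function.comp]
    rw [heq]; exact h.map pv_q_inj
  unfold calculate_behavioral_scores_py_alt
  simp only [pv_B_fold]
  have hD : (qd.foldl (fun d p => d.insert ("q_" ++ p.1) p.2)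
        (((PySem.Dict.empty.insert "social_communication_score" 0).insert
            "autism_traits_score" 0).insert "total_behavioral_score" 0))
      = PySem.Dict.mk (("social_communication_score", (0:Int)) :: ("autism_traits_score", (0:Int)) ::
          ("total_behavioral_score", (0:Int)) :: qd.map (fun p => ("q_" ++ p.1, p.2))) := by
    apply PySem.Dict.ext
    rw [PySem.Dict.items_foldl_insert_fresh qd (fun p => "q_" ++ p.1) (fun p => p.2) _
          (fun p _ => by
            simp [PySem.Dict.contains_insert, PySem.Dict.contains_empty,
                  (pv_q_ne p.1).1, (pv_q_ne p.1).2.1, (pv_q_ne p.1).2.2])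
          hkeys]
    simp [PySem.Dict.items_insert, PySem.Dict.contains_insert, PySem.Dict.empty]
  simp only [hD]
  rw [pv_final_items _ (fun p hp => by
    obtain ⟨q, _, rfl⟩ := List.mem_map.mp hp
    exact ⟨(pv_q_ne q.1).1, (pv_q_ne q.1).2.1, (pv_q_ne q.1).2.2⟩)]
  simp

-- ===== VERDICT (by name: the statement is the Claim_ definition above) =====
theorem calculate_behavioral_scores_py_spec : Claim_equal_calculate_behavioral_scores_py := by
  intro qd _ hpre
  unfold Spec_calculate_behavioral_scores_py
  rw [pv_A_items qd hpre, pv_B_items qd hpre,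
      pv_sum_eq pvSocialQs (by decide) qd hpre, pv_sum_eq pvAutismQs (by decide) qd hpre]
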